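-- pv_equiv track=rewrite | github.com/CClairvoyant/Python-course | XP/xp02_conversation/conversation.py | find_catalan_numbers
-- ===== SOURCE A (Python) =====
-- def find_catalan_numbers(biggest_number: int):
--     """
--     Find all Catalan numbers in range(end inclusive).
--
--     Can be solved using recursion.
--     :param biggest_number: all catalan numbers in range of biggest_number(included)
--     https://en.wikipedia.org/wiki/Catalan_number
--     :return: list of catalan numbers
--     """
--     catalan_list = []
--     for num in range(biggest_number):
--         if catalan(num) <= biggest_number:
--             catalan_list.append(catalan(num))
--         else:
--             break
--     return catalan_list
--
-- def catalan(num):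
--     """Find catalan number."""
--     if num <= 1:
--         return 1
--     result = 0
--     for i in range(num):
--         result += catalan(i) * catalan(num - i - 1)
--     return result
-- ===== SOURCE B (Python) =====
-- def find_catalan_numbers(biggest_number):
--     """Catalan numbers <= biggest_number (at most biggest_number of them), each
--     computed once from the previous via C(n+1) = C(n)*2*(2n+1)//(n+2)."""
--     result = []
--     n = 0
--     c = 1
--     while n < biggest_number and c <= biggest_number:
--         result.append(c)
--         c = c * 2 * (2 * n + 1) // (n + 2)
--         n += 1
--     return result
-- ===== Notes on version B (the rewrite author's own statement) =====
-- stated objective: faster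
-- what changed: Replaces the doubly-exponential naive recursive convolution (catalan recomputed from scratch at every loop step) by a single while-loop that carries the current Catalan number and advances it with the exact ratio recurrence between consecutive Catalan numbers.
import Mathlib
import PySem

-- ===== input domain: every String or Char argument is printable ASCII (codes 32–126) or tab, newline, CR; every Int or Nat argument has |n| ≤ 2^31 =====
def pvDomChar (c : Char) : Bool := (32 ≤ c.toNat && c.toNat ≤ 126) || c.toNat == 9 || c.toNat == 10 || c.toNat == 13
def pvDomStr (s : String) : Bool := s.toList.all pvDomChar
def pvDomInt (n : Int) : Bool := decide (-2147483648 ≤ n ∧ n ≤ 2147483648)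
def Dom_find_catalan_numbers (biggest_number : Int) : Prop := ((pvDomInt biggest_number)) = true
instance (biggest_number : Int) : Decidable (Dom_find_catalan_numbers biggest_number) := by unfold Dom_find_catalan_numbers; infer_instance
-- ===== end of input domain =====

-- B replaces A's exponential recursive convolution by one linear pass with the ratio recurrence; return value only.
-- ===== PORT A =====
-- helper `catalan` of A: naive recursion, result += catalan(i) * catalan(num - i - 1)
def catalanA (num : Nat) : Int :=
  if num ≤ 1 then 1
  else (List.range num).attach.foldl
    (fun result i => result + catalanA i.1 * catalanA (num - i.1 - 1)) 0
decreasing_by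
  · exact List.mem_range.mp i.2
  · have := List.mem_range.mp i.2; omega

-- the `for num in range(biggest_number)` loop with its break, over the remaining nums
def loopA (biggest_number : Int) : List Nat → List Int → List Int
  | [], catalan_list => catalan_list
  | num :: rest, catalan_list =>
      if catalanA num ≤ biggest_number then
        loopA biggest_number rest (catalan_list ++ [catalanA num])
      else catalan_list

def find_catalan_numbers (biggest_number : Int) : List Int :=
  loopA biggest_number (List.range biggest_number.toNat) []

-- ===== PORT B =====
-- the while-loop of B: state (n, c); stops when n ≥ biggest_number or c > biggest_number
def loopB (biggest_number : Int) (n : Nat) (c : Int) : List Int :=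
  if h : (n : Int) < biggest_number ∧ c ≤ biggest_number then
    c :: loopB biggest_number (n + 1) (PySem.Int.floordiv (c * 2 * (2 * (n : Int) + 1)) ((n : Int) + 2))
  else []
termination_by biggest_number.toNat - n
decreasing_by omega

def find_catalan_numbers_alt (biggest_number : Int) : List Int :=
  loopB biggest_number 0 1

-- ===== PRECONDITION & SPEC =====
def Spec_find_catalan_numbers (biggest_number : Int) (out : List Int) : Prop := out = find_catalan_numbers_alt biggest_number
instance (biggest_number : Int) (out : List Int) : Decidable (Spec_find_catalan_numbers biggest_number out) := by unfold Spec_find_catalan_numbers; infer_instance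

-- ===== CLAIM (what is proved, stated in full; the proofs are below) =====
def Claim_equal_find_catalan_numbers : Prop := ∀ (biggest_number : Int), Dom_find_catalan_numbers biggest_number → Spec_find_catalan_numbers biggest_number (find_catalan_numbers biggest_number)

-- ===== LEMMAS AND PROOFS =====

-- A's helper computes the Catalan numbers
theorem catalanA_eq (n : Nat) : catalanA n = (catalan n : Int) := by
  induction n using Nat.strong_induction_on with
  | _ n ih =>
    rw [catalanA]
    by_cases h : n ≤ 1
    · interval_cases n <;> simp
    · simp only [if_neg h]
      obtain ⟨m, rfl⟩ : ∃ m, n = m + 1 := ⟨n - 1, by omega⟩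
      have hfold : ∀ (l : List {x // x ∈ List.range (m + 1)}) (r : Int),
          l.foldl (fun result i => result + catalanA i.1 * catalanA (m + 1 - i.1 - 1)) r
            = r + ((l.map (fun i => ((catalan i.1 * catalan (m - i.1) : Nat) : Int))).sum) := by
        intro l
        induction l with
        | nil => intro r; simp
        | cons a t iht =>
          intro r
          have ha : a.1 < m + 1 := List.mem_range.mp a.2
          simp only [List.foldl_cons, List.map_cons, List.sum_cons]
          rw [iht, ih a.1 (by omega), ih (m + 1 - a.1 - 1) (by omega)]
          have : m + 1 - a.1 - 1 = m - a.1 := by omega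
          rw [this]
          push_cast
          ring
      rw [hfold, List.attach_map_val (l := List.range (m + 1))
        (f := fun i => ((catalan i * catalan (m - i) : Nat) : Int))]
      rw [catalan_succ, Fin.sum_univ_eq_sum_range (fun i => catalan i * catalan (m - i))]
      push_cast
      exact zero_add _ |>.trans rfl

-- the ratio step advances Catalan numbers: key arithmetic identity
theorem catalan_ratio (n : Nat) :
    (n + 2) * catalan (n + 1) = 2 * (2 * n + 1) * catalan n := by
  have h1 : (n + 2) * catalan (n + 1) = Nat.centralBinom (n + 1) := by
    rw [show n + 2 = n + 1 + 1 by omega]; exact succ_mul_catalan_eq_centralBinom (n + 1)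
  have h2 : (n + 1) * Nat.centralBinom (n + 1) = 2 * (2 * n + 1) * Nat.centralBinom n :=
    Nat.succ_mul_centralBinom_succ n
  have h3 : (n + 1) * catalan n = Nat.centralBinom n :=
    succ_mul_catalan_eq_centralBinom n
  have key : Nat.centralBinom (n + 1) = 2 * (2 * n + 1) * catalan n := by
    have : (n + 1) * Nat.centralBinom (n + 1) = (n + 1) * (2 * (2 * n + 1) * catalan n) := by
      rw [h2, ← h3]; ring
    exact Nat.eq_of_mul_eq_mul_left (by omega) this
  exact h1.trans key

theorem step_eq (n : Nat) :
    PySem.Int.floordiv ((catalan n : Int) * 2 * (2 * (n : Int) + 1)) ((n : Int) + 2)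
      = (catalan (n + 1) : Int) := by
  have hpos : (0 : Int) < (n : Int) + 2 := by omega
  rw [PySem.Int.floordiv_eq_ediv_of_pos hpos]
  have hnum : (catalan n : Int) * 2 * (2 * (n : Int) + 1)
      = ((n : Int) + 2) * (catalan (n + 1) : Int) := by
    have := catalan_ratio n
    have h : ((n + 2) * catalan (n + 1) : Nat) = (2 * (2 * n + 1) * catalan n : Nat) := this
    have := congrArg (fun k : Nat => (k : Int)) h
    push_cast at this ⊢
    linarith
  rw [hnum, Int.mul_ediv_cancel_left _ (by omega)]

-- main loop correspondence (positive bound)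
theorem loop_eq (biggest_number : Int) :
    ∀ (k n : Nat) (acc : List Int), (n : Int) + (k : Int) = biggest_number →
      loopA biggest_number (List.range' n k) acc
        = acc ++ loopB biggest_number n (catalan n : Int) := by
  intro k
  induction k with
  | zero =>
    intro n acc h
    rw [loopB]
    simp only [List.range', loopA]
    rw [dif_neg (by omega)]
    simp
  | succ k ihk =>
    intro n acc h
    rw [List.range'_succ, loopA, loopB, catalanA_eq]
    by_cases hc : (catalan n : Int) ≤ biggest_number
    · rw [if_pos hc, dif_pos ⟨by omega, hc⟩, step_eq]
      rw [ihk (n + 1) _ (by push_cast; omega)]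
      simp
    · rw [if_neg hc, dif_neg (by tauto)]
      simp

-- ===== VERDICT (by name: the statement is the Claim_ definition above) =====
theorem find_catalan_numbers_spec : Claim_equal_find_catalan_numbers := by
  unfold Claim_equal_find_catalan_numbers
  intro b _
  unfold Spec_find_catalan_numbers find_catalan_numbers find_catalan_numbers_alt
  by_cases hb : 0 < b
  · have : List.range b.toNat = List.range' 0 b.toNat := by rw [List.range_eq_range']
    rw [this, loop_eq b b.toNat 0 [] (by omega)]
    simp
  · have h0 : b.toNat = 0 := by omega
    rw [h0, loopB]
    simp only [List.range_zero, loopA]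
    rw [dif_neg (by omega)]
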